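-- pv_equiv track=rewrite | github.com/HumanChwan/CookieBot | CookieMain.py | Checklog
-- ===== SOURCE A (Python) =====
-- def Checklog(a, b):
--     cnt_dig = cnt_plc = 0
--     for i in range(len(b)):
--         for j in range(len(a)):
--             if a[j] == b[i]:
--                 cnt_dig += 1
--                 if i == j:
--                     cnt_plc += 1
--     return [cnt_dig, cnt_plc]
-- ===== SOURCE B (Python) =====
-- def Checklog(a, b):
--     cnt = {}
--     for ch in a:
--         cnt[ch] = cnt.get(ch, 0) + 1
--     cnt_dig = 0
--     for ch in b:
--         cnt_dig += cnt.get(ch, 0)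
--     cnt_plc = 0
--     for x, y in zip(a, b):
--         if x == y:
--             cnt_plc += 1
--     return [cnt_dig, cnt_plc]
-- ===== Notes on version B (the rewrite author's own statement) =====
-- stated objective: faster
-- what changed: Replaces the O(n*m) nested positional scan with a frequency dictionary built once over a (cnt_dig = sum of counts over b) plus a single zip pass for the positional matches.
import Mathlib
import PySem

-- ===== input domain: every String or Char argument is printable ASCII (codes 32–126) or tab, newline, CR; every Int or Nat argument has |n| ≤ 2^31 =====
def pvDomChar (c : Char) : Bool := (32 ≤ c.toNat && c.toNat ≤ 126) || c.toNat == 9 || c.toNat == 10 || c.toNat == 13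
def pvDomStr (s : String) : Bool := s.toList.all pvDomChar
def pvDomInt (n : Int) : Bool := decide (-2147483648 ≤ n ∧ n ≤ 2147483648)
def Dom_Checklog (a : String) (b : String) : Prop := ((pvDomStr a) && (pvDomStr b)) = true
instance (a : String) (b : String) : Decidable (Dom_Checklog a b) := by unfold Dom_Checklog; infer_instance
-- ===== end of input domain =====

-- B replaces A's nested scan with a frequency dictionary built once over `a` plus one zip pass (objective: faster).

-- ===== PORT A =====
-- literal port of A's nested index loops over range(len(b)) × range(len(a))
def Checklog (a : String) (b : String) : List Int :=
  let la := a.toList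
  let lb := b.toList
  let s := (PySem.List.pyRange 0 (lb.length : Int) 1).foldl (fun (s : Int × Int) i =>
      (PySem.List.pyRange 0 (la.length : Int) 1).foldl (fun (t : Int × Int) j =>
        if PySem.List.pyGetD la j ' ' == PySem.List.pyGetD lb i ' ' then
          (t.1 + 1, if i == j then t.2 + 1 else t.2)
        else t) s) ((0 : Int), (0 : Int))
  [s.1, s.2]

-- ===== PORT B =====
-- port of Source B: counting dict built over a, one lookup pass over b, one zip pass for positions
def Checklog_alt (a : String) (b : String) : List Int :=
  let la := a.toList
  let lb := b.toList
  let cnt := la.foldl (fun (d : PySem.Dict Char Int) ch => d.insert ch (d.getD ch 0 + 1)) PySem.Dict.empty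
  let cnt_dig := lb.foldl (fun (s : Int) ch => s + cnt.getD ch 0) 0
  let cnt_plc := (la.zip lb).foldl (fun (s : Int) p => if p.1 == p.2 then s + 1 else s) 0
  [cnt_dig, cnt_plc]

-- ===== PRECONDITION & SPEC =====
def Spec_Checklog (a : String) (b : String) (out : List Int) : Prop := out = Checklog_alt a b
instance (a : String) (b : String) (out : List Int) : Decidable (Spec_Checklog a b out) := by unfold Spec_Checklog; infer_instance

-- ===== CLAIM (what is proved, stated in full; the proofs are below) =====
def Claim_equal_Checklog : Prop := ∀ (a : String) (b : String), Dom_Checklog a b → Spec_Checklog a b (Checklog a b)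

-- ===== LEMMAS AND PROOFS =====

-- the counting-dict loop of B is a counter: lookup = occurrence count
theorem counterD (xs : List Char) (d : PySem.Dict Char Int) (c : Char) :
    (xs.foldl (fun (d : PySem.Dict Char Int) ch => d.insert ch (d.getD ch 0 + 1)) d).getD c 0
      = d.getD c 0 + (xs.count c : Int) := by
  induction xs generalizing d with
  | nil => simp
  | cons x xs ih =>
    simp only [List.foldl_cons, ih, List.count_cons, PySem.Dict.getD_insert]
    by_cases h : c = x
    · subst h; simp; ring
    · simp [h, Ne.symm h]

-- A's inner loop over range(len(a)) characterized: adds the count of c in la, and 1 to plc iff position i matches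
theorem innerA (la : List Char) (c : Char) (i : Int) (t : Int × Int) (n : Nat) (hn : n ≤ la.length) :
    (List.range n).foldl (fun (t : Int × Int) (j : Nat) =>
        if PySem.List.pyGetD la (j : Int) ' ' == c then
          (t.1 + 1, if i == (j : Int) then t.2 + 1 else t.2)
        else t) t
      = (t.1 + (((la.take n).count c : Nat) : Int),
         t.2 + if 0 ≤ i ∧ i < (n : Int) ∧ la.getD i.toNat ' ' = c then 1 else 0) := by
  induction n with
  | zero =>
    simp only [List.range_zero, List.foldl_nil, List.take_zero, List.count_nil, Nat.cast_zero]
    rw [if_neg (by rintro ⟨h1,h2,_⟩; omega)]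
    simp
  | succ n ih =>
    have hn' : n ≤ la.length := by omega
    have hlt : n < la.length := by omega
    rw [List.range_succ, List.foldl_append, ih hn']
    have htake : ((la.take (n+1)).count c : Int) = ((la.take n).count c : Int) + (if la.getD n ' ' = c then 1 else 0) := by
      have he : la.take (n+1) = la.take n ++ [la[n]] := by
        rw [List.take_add_one]
        simp [List.getElem?_eq_getElem hlt]
      have hg : la.getD n ' ' = la[n] := by
        simp [List.getD_eq_getElem?_getD, List.getElem?_eq_getElem hlt]
      rw [he, List.count_append, hg]
      by_cases h : la[n] = c
      · simp [h]
      · simp [h]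
    simp only [List.foldl_cons, List.foldl_nil, PySem.List.pyGetD_natCast]
    by_cases hc : la.getD n ' ' = c
    · rw [if_pos (by simpa using hc)]
      by_cases hi : i = (n : Int)
      · rw [if_pos (by simp [hi])]
        rw [if_neg (by rintro ⟨h1,h2,_⟩; omega)]
        rw [if_pos ⟨by omega, by push_cast; omega, by rw [hi]; simpa using hc⟩]
        rw [Prod.mk.injEq]
        constructor
        · rw [htake, if_pos hc]; ring
        · ring
      · rw [if_neg (by simp [hi])]
        have hiff : (0 ≤ i ∧ i < ((n+1 : Nat) : Int) ∧ la.getD i.toNat ' ' = c) ↔ (0 ≤ i ∧ i < (n:Int) ∧ la.getD i.toNat ' ' = c) := by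
          constructor
          · rintro ⟨a1,a2,a3⟩
            refine ⟨a1, ?_, a3⟩
            push_cast at a2
            omega
          · rintro ⟨a1,a2,a3⟩; exact ⟨a1, by push_cast; omega, a3⟩
        rw [Prod.mk.injEq]
        constructor
        · rw [htake, if_pos hc]; ring
        · by_cases hA : 0 ≤ i ∧ i < (n:Int) ∧ la.getD i.toNat ' ' = c
          · rw [if_pos hA, if_pos (hiff.mpr hA)]
          · rw [if_neg hA, if_neg (fun h => hA (hiff.mp h))]
    · rw [if_neg (by simpa using hc)]
      have hiff : (0 ≤ i ∧ i < ((n+1 : Nat) : Int) ∧ la.getD i.toNat ' ' = c) ↔ (0 ≤ i ∧ i < (n:Int) ∧ la.getD i.toNat ' ' = c) := by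
        constructor
        · rintro ⟨a1,a2,a3⟩
          refine ⟨a1, ?_, a3⟩
          push_cast at a2
          rcases lt_or_eq_of_le (by omega : i ≤ (n:Int)) with h|h
          · exact h
          · exfalso; apply hc; rw [← a3, h]; simp
        · rintro ⟨a1,a2,a3⟩; exact ⟨a1, by push_cast; omega, a3⟩
      rw [Prod.mk.injEq]
      constructor
      · rw [htake, if_neg hc]; ring
      · by_cases hA : 0 ≤ i ∧ i < (n:Int) ∧ la.getD i.toNat ' ' = c
        · rw [if_pos hA, if_pos (hiff.mpr hA)]
        · rw [if_neg hA, if_neg (fun h => hA (hiff.mp h))]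

-- a pair-state fold whose components evolve independently splits into two sums
theorem fold_split {α : Type} (l : List α) (f g : α → Int) (t : Int × Int) :
    l.foldl (fun (t : Int × Int) x => (t.1 + f x, t.2 + g x)) t
      = (t.1 + (l.map f).sum, t.2 + (l.map g).sum) := by
  induction l generalizing t with
  | nil => simp
  | cons x xs ih =>
    simp only [List.foldl_cons, ih, List.map_cons, List.sum_cons]
    rw [Prod.mk.injEq]
    constructor <;> ring

-- reading a list back through getD over range(len) gives the list
theorem range_map_getD {α : Type} (l : List α) (d : α) :
    (List.range l.length).map (fun j => l.getD j d) = l := by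
  apply List.ext_getElem
  · simp
  · intro i h1 h2
    simp [List.getD_eq_getElem?_getD, List.getElem?_eq_getElem h2]

-- the positional-match indicator sum over indices of lb equals the zip count
theorem plc_eq (la lb : List Char) :
    ((List.range lb.length).map (fun j =>
        if j < la.length ∧ la.getD j ' ' = lb.getD j ' ' then (1 : Int) else 0)).sum
      = (((la.zip lb).countP (fun p => p.1 == p.2) : Nat) : Int) := by
  induction la generalizing lb with
  | nil => simp
  | cons x xs ih =>
    cases lb with
    | nil => simp
    | cons y ys =>
      rw [show (y::ys).length = ys.length + 1 from rfl, List.range_succ_eq_map,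
          List.map_cons, List.map_map, List.sum_cons]
      have htail : ((List.range ys.length).map ((fun j =>
          if j < (x::xs).length ∧ (x::xs).getD j ' ' = (y::ys).getD j ' ' then (1:Int) else 0) ∘ Nat.succ)).sum
          = ((List.range ys.length).map (fun j =>
          if j < xs.length ∧ xs.getD j ' ' = ys.getD j ' ' then (1:Int) else 0)).sum := by
        congr 1
        apply List.map_congr_left
        intro j hj
        simp
      rw [htail, ih ys, List.zip_cons_cons, List.countP_cons]
      by_cases h : x = y
      · rw [if_pos ⟨by simp, by simpa using h⟩]
        simp [h]
        omega
      · rw [if_neg (by rintro ⟨_, h2⟩; exact h (by simpa using h2))]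
        simp [h]

-- ===== VERDICT (by name: the statement is the Claim_ definition above) =====
theorem Checklog_spec : Claim_equal_Checklog := by
  intro a b _
  unfold Spec_Checklog Checklog Checklog_alt
  simp only []
  set la := a.toList with hla
  set lb := b.toList with hlb
  -- outer loops over pyRange become loops over List.range
  simp only [PySem.List.pyRange_zero_nat, List.foldl_map]
  -- evaluate A's nested fold
  have hbody : ∀ (s : Int × Int) (i : Nat),
      (List.range la.length).foldl (fun (t : Int × Int) (j : Nat) =>
        if PySem.List.pyGetD la (j : Int) ' ' == PySem.List.pyGetD lb (i : Int) ' ' then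
          (t.1 + 1, if (i : Int) == (j : Int) then t.2 + 1 else t.2)
        else t) s
      = (s.1 + ((la.count (lb.getD i ' ') : Nat) : Int),
         s.2 + if i < la.length ∧ la.getD i ' ' = lb.getD i ' ' then 1 else 0) := by
    intro s i
    rw [innerA la (PySem.List.pyGetD lb (i : Int) ' ') (i : Int) s la.length (le_refl _)]
    rw [List.take_length]
    congr 1
    · rw [PySem.List.pyGetD_natCast]
    · have hiff : (0 ≤ (i:Int) ∧ (i:Int) < (la.length : Int) ∧ la.getD ((i:Int)).toNat ' ' = PySem.List.pyGetD lb (i : Int) ' ')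
          ↔ (i < la.length ∧ la.getD i ' ' = lb.getD i ' ') := by
        rw [PySem.List.pyGetD_natCast]
        constructor
        · rintro ⟨_, h2, h3⟩
          exact ⟨by exact_mod_cast h2, by simpa using h3⟩
        · rintro ⟨h2, h3⟩
          exact ⟨by omega, by exact_mod_cast h2, by simpa using h3⟩
      by_cases hA : i < la.length ∧ la.getD i ' ' = lb.getD i ' '
      · rw [if_pos hA, if_pos (hiff.mpr hA)]
      · rw [if_neg hA, if_neg (fun h => hA (hiff.mp h))]
  simp only [hbody]
  rw [fold_split (List.range lb.length)
        (fun i => ((la.count (lb.getD i ' ') : Nat) : Int))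
        (fun i => if i < la.length ∧ la.getD i ' ' = lb.getD i ' ' then (1:Int) else 0)
        ((0 : Int), (0 : Int))]
  -- B's cnt_dig pass
  rw [PySem.List.foldl_add lb (fun ch =>
        (la.foldl (fun (d : PySem.Dict Char Int) ch => d.insert ch (d.getD ch 0 + 1)) PySem.Dict.empty).getD ch 0) 0]
  have hcnt : lb.map (fun ch =>
        (la.foldl (fun (d : PySem.Dict Char Int) ch => d.insert ch (d.getD ch 0 + 1)) PySem.Dict.empty).getD ch 0)
      = lb.map (fun ch => ((la.count ch : Nat) : Int)) := by
    apply List.map_congr_left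
    intro ch _
    rw [counterD]
    simp [PySem.Dict.getD]
  rw [hcnt]
  -- B's cnt_plc pass
  rw [PySem.List.foldl_if_add_one (fun p : Char × Char => p.1 == p.2) (la.zip lb) 0]
  -- first components agree
  have hdig : ((List.range lb.length).map (fun i => ((la.count (lb.getD i ' ') : Nat) : Int))).sum
      = (lb.map (fun ch => ((la.count ch : Nat) : Int))).sum := by
    have : ((List.range lb.length).map (fun i => ((la.count (lb.getD i ' ') : Nat) : Int)))
        = ((List.range lb.length).map (fun j => lb.getD j ' ')).map (fun ch => ((la.count ch : Nat) : Int)) := by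
      rw [List.map_map]
      rfl
    rw [this, range_map_getD]
  rw [hdig, plc_eq]
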